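-- pv_equiv track=rewrite | github.com/stshryu/advent_of_code | 2024/2/3.py | validl
-- ===== SOURCE A (Python) =====
-- def validl(level, r=None):
--     prev = level[0]
--     for i in range(1, len(level)):
--         if prev == level[i] or abs(prev-level[i]) > 3:
--             if r: return (False, [])
--             temp = []
--             res, _ = validl(level[:i] + level[i+1:], 1)
--             if res:
--                 temp.append(i)
--             res2, _ = validl(level[:i-1] + level[i:], 1)
--             if res2:
--                 temp.append(i-1)
--             return (True, temp) if temp else (False, [])
--         prev = level[i]
--     return (True, [])
-- ===== SOURCE B (Python) =====
-- def validl(level, r=None):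
--     def good(a, b):
--         return a != b and abs(a - b) <= 3
--
--     n = len(level)
--     k = next((m for m in range(n - 1) if not good(level[m], level[m + 1])), None)
--     if k is None:
--         return (True, [])
--     if r:
--         return (False, [])
--
--     def suffix_ok(s):
--         return all(good(level[m], level[m + 1]) for m in range(s, n - 1))
--
--     temp = []
--     # removing index k+1: stitch level[k] to level[k+2] (if any), rest of pairs unchanged
--     if (k + 2 >= n or good(level[k], level[k + 2])) and suffix_ok(k + 2):
--         temp.append(k + 1)
--     # removing index k: stitch level[k-1] to level[k+1] (if any), rest of pairs unchanged
--     if (k == 0 or good(level[k - 1], level[k + 1])) and suffix_ok(k + 1):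
--         temp.append(k)
--     return (True, temp) if temp else (False, [])
-- ===== Notes on version B (the rewrite author's own statement) =====
-- stated objective: alternative
-- what changed: B never builds or re-validates the two candidate lists: it finds the first bad adjacent pair once and decides each one-element removal locally by a 'stitch' test on the pair the removal newly creates plus a scan of the untouched suffix pairs, instead of A's recursive self-call that rescans a rebuilt list.
import Mathlib
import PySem

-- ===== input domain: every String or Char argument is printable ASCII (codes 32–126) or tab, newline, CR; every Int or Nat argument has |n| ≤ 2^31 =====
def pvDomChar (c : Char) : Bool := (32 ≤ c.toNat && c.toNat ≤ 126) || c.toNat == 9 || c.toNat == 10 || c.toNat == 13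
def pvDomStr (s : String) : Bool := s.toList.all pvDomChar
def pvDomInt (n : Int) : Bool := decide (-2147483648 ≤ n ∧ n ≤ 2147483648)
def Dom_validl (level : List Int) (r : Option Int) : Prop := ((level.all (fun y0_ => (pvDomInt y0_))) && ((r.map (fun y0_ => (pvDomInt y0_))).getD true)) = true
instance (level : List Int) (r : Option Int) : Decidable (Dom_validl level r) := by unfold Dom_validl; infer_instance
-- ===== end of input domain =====

-- B replaces A's recursive re-validation of rebuilt candidate lists with a first-bad-pair scan
-- plus a local "stitch" test and suffix scan, never constructing the modified lists (objective: alternative).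
-- Pre_ excludes only the empty list, on which A raises IndexError.


-- ===== PORT A =====
-- Python truthiness of the parameter r (None or an int)
def pyTruthy (r : Option Int) : Bool :=
  match r with
  | none => false
  | some k => k != 0

mutual
-- literal transliteration of A; indices in the loop are in range, so getD is exact;
-- level[:i] + level[i+1:] with 0 ≤ i is take/drop
def validl (level : List Int) (r : Option Int) : Bool × List Int :=
  match level with
  | [] => (false, [])  -- Python raises IndexError reading the first element here; excluded by Pre_validl
  | a :: t => validlGo (a :: t) r 1 a (by omega)
termination_by (level.length, 1, 0)

def validlGo (level : List Int) (r : Option Int) (i : Nat) (prev : Int) (hi1 : 1 ≤ i) : Bool × List Int :=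
  if h : i < level.length then
    let cur := level.getD i 0
    if prev == cur || (prev - cur).natAbs > 3 then
      if pyTruthy r then (false, [])
      else
        let res := (validl (level.take i ++ level.drop (i + 1)) (some 1)).1
        let res2 := (validl (level.take (i - 1) ++ level.drop i) (some 1)).1
        let temp := (if res then [(i : Int)] else []) ++ (if res2 then [(i : Int) - 1] else [])
        if temp.isEmpty then (false, []) else (true, temp)
    else
      validlGo level r (i + 1) (level.getD i 0) (by omega)
  else (true, [])
termination_by (level.length, 0, level.length - i)
decreasing_by
  all_goals simp_wf
  all_goals first
    | (apply Prod.Lex.left; omega)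
    | (apply Prod.Lex.right; apply Prod.Lex.left; omega)
    | (apply Prod.Lex.right; apply Prod.Lex.right; omega)
end

-- ===== PORT B =====
-- good(a, b): a != b and abs(a - b) <= 3
def goodB (a b : Int) : Bool := a != b && (a - b).natAbs ≤ 3

-- good(level[m], level[m+1]); all indices used by B are in range, so getD is exact
def goodIdx (xs : List Int) (m : Nat) : Bool := goodB (xs.getD m 0) (xs.getD (m + 1) 0)

-- next((m for m in range(n-1) if not good(level[m], level[m+1])), None)
def firstBad (xs : List Int) : Option Nat :=
  (List.range (xs.length - 1)).find? (fun m => !goodIdx xs m)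

-- all(good(level[m], level[m+1]) for m in range(s, n-1));  List.range' s (n-1-s) = Python range(s, n-1)
def suffOk (xs : List Int) (s : Nat) : Bool :=
  (List.range' s (xs.length - 1 - s)).all (fun m => goodIdx xs m)

def validl_alt (level : List Int) (r : Option Int) : Bool × List Int :=
  match firstBad level with
  | none => (true, [])
  | some k =>
    if pyTruthy r then (false, [])
    else
      -- removing index k+1: stitch level[k]→level[k+2] (if any) and the untouched suffix pairs
      let t1 := (decide (k + 2 ≥ level.length) || goodB (level.getD k 0) (level.getD (k + 2) 0)) && suffOk level (k + 2)
      -- removing index k: stitch level[k-1]→level[k+1] (if any) and the untouched suffix pairs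
      let t2 := (k == 0 || goodB (level.getD (k - 1) 0) (level.getD (k + 1) 0)) && suffOk level (k + 1)
      let temp := (if t1 then [((k : Int) + 1)] else []) ++ (if t2 then [(k : Int)] else [])
      if temp.isEmpty then (false, []) else (true, temp)

-- ===== PRECONDITION & SPEC =====
-- Pre_ excludes only the empty list, on which Python A raises IndexError reading the first element.
def Pre_validl (level : List Int) (_r : Option Int) : Prop := level ≠ []
instance (level : List Int) (r : Option Int) : Decidable (Pre_validl level r) := by unfold Pre_validl; infer_instance
def pvWitness_validl : List Int × Option Int := ([1, 2, 5, 3], none)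

def Spec_validl (level : List Int) (r : Option Int) (out : Bool × List Int) : Prop := out = validl_alt level r
instance (level : List Int) (r : Option Int) (out : Bool × List Int) : Decidable (Spec_validl level r out) := by unfold Spec_validl; infer_instance

-- ===== CLAIM (what is proved, stated in full; the proofs are below) =====
def Claim_equal_validl : Prop := ∀ (level : List Int) (r : Option Int), Dom_validl level r → Pre_validl level r → Spec_validl level r (validl level r)

-- ===== LEMMAS AND PROOFS =====

-- adjacent-pair check of A's inner (r truthy) call, previous element carried along
def pairsOk : Int → List Int → Bool
  | _, [] => true
  | p, c :: t => (!(p == c || decide ((p - c).natAbs > 3))) && pairsOk c t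

-- the full adjacent-pair validity A's inner call computes (proof-side name)
def okA (xs : List Int) : Bool :=
  match xs with
  | [] => true
  | a :: t => pairsOk a t

-- first bad pair index at or after s (proof-side generalisation of firstBad)
def fbf (xs : List Int) (s : Nat) : Option Nat :=
  (List.range' s (xs.length - 1 - s)).find? (fun m => !goodIdx xs m)

theorem firstBad_eq_fbf (xs : List Int) : firstBad xs = fbf xs 0 := by
  simp [firstBad, fbf, List.range_eq_range']

theorem getD_eq_getElem (xs : List Int) (i : Nat) (hi : i < xs.length) :
    xs.getD i 0 = xs[i] := by
  simp [List.getD_eq_getElem?_getD, List.getElem?_eq_getElem hi]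

theorem not_viol_eq_good (p c : Int) :
    (!(p == c || decide ((p - c).natAbs > 3))) = goodB p c := by
  rw [goodB, Bool.not_or]
  congr 1
  rw [← decide_not]
  apply decide_eq_decide.mpr
  omega

theorem fbf_step (xs : List Int) (s : Nat) (hs : s + 1 < xs.length) :
    fbf xs s = if goodIdx xs s then fbf xs (s + 1) else some s := by
  have h1 : xs.length - 1 - s = (xs.length - 1 - (s + 1)) + 1 := by omega
  rw [fbf, h1, List.range'_succ, List.find?_cons]
  cases h : goodIdx xs s <;> simp [fbf]

theorem fbf_none (xs : List Int) (s : Nat) (hs : xs.length ≤ s + 1) :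
    fbf xs s = none := by
  have : xs.length - 1 - s = 0 := by omega
  simp [fbf, this]

theorem fbf_first (xs : List Int) (m k : Nat) :
    ∀ n s, xs.length - s ≤ n → fbf xs s = some k → s ≤ m → m < k → goodIdx xs m = true := by
  intro n
  induction n with
  | zero =>
    intro s hle hf _ _
    rw [fbf_none xs s (by omega)] at hf
    exact absurd hf (by simp)
  | succ n ih =>
    intro s hle hf hsm hmk
    have hlt : s + 1 < xs.length := by
      by_contra hge
      rw [fbf_none xs s (by omega)] at hf
      exact absurd hf (by simp)
    rw [fbf_step xs s hlt] at hf
    by_cases hg : goodIdx xs s = true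
    · rw [if_pos hg] at hf
      rcases Nat.eq_or_lt_of_le hsm with he | hl
      · rwa [← he]
      · exact ih (s + 1) (by omega) hf (by omega) hmk
    · rw [if_neg hg] at hf
      have : s = k := by simpa using hf
      omega

theorem fbf_some (xs : List Int) (s k : Nat) (h : fbf xs s = some k) :
    s ≤ k ∧ k + 1 < xs.length ∧ goodIdx xs k = false ∧
      ∀ m, s ≤ m → m < k → goodIdx xs m = true := by
  have hmem := List.mem_of_find?_eq_some h
  have hk := List.find?_some h
  rw [List.mem_range'_1] at hmem
  exact ⟨hmem.1, by omega, by simpa using hk,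
    fun m hsm hmk => fbf_first xs m k xs.length s (by omega) h hsm hmk⟩

-- A's flagged recursive call is exactly the plain adjacent-pair scan
theorem go_truthy (xs : List Int) :
    ∀ n i prev (hi1 : 1 ≤ i), xs.length - i ≤ n →
      validlGo xs (some 1) i prev hi1 = (pairsOk prev (xs.drop i), []) := by
  intro n
  induction n with
  | zero =>
    intro i prev hi1 h
    have hni : ¬ i < xs.length := by omega
    rw [validlGo.eq_def, dif_neg hni, List.drop_eq_nil_of_le (by omega)]
    rfl
  | succ n ih =>
    intro i prev hi1 h
    rw [validlGo.eq_def]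
    by_cases hi : i < xs.length
    · rw [dif_pos hi]
      have hg : xs.getD i 0 = xs[i] := getD_eq_getElem xs i hi
      rw [List.drop_eq_getElem_cons hi, pairsOk, hg]
      by_cases hv : (prev == xs[i] || decide ((prev - xs[i]).natAbs > 3)) = true
      · rw [if_pos hv, hv]
        simp [pyTruthy]
      · rw [if_neg hv, ih (i + 1) xs[i] (by omega) (by omega)]
        simp only [Bool.not_eq_true] at hv
        rw [hv]
        simp
    · rw [dif_neg hi, List.drop_eq_nil_of_le (by omega)]
      rfl

theorem validl_truthy (xs : List Int) (hne : xs ≠ []) :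
    validl xs (some 1) = (okA xs, []) := by
  match xs with
  | a :: t =>
    rw [validl, go_truthy (a :: t) (a :: t).length 1 a (by omega) (by omega)]
    simp [okA]

-- pairsOk characterised by goodIdx over all pair positions
theorem pairsOk_iff (a : Int) (t : List Int) :
    pairsOk a t = true ↔ ∀ m, m + 1 < (a :: t).length → goodIdx (a :: t) m = true := by
  induction t generalizing a with
  | nil => simp [pairsOk]
  | cons b t ih =>
    rw [pairsOk, not_viol_eq_good, Bool.and_eq_true, ih]
    constructor
    · rintro ⟨h0, hrest⟩ m hm
      cases m with
      | zero => simpa [goodIdx] using h0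
      | succ m =>
        have := hrest m (by simpa using hm)
        simpa [goodIdx] using this
    · intro h
      constructor
      · simpa [goodIdx] using h 0 (by simp)
      · intro m hm
        have := h (m + 1) (by simpa using hm)
        simpa [goodIdx] using this

theorem suffOk_iff (xs : List Int) (s : Nat) :
    suffOk xs s = true ↔ ∀ m, s ≤ m → m + 1 < xs.length → goodIdx xs m = true := by
  simp only [suffOk, List.all_eq_true, List.mem_range'_1]
  constructor
  · intro h m h1 h2; exact h m ⟨h1, by omega⟩
  · rintro h m ⟨h1, h2⟩; exact h m h1 (by omega)

-- getD of the list with index j removed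
theorem getD_splice (xs : List Int) (j m : Nat) (hj : j < xs.length) :
    (xs.take j ++ xs.drop (j + 1)).getD m 0
      = if m < j then xs.getD m 0 else xs.getD (m + 1) 0 := by
  simp only [List.getD_eq_getElem?_getD, List.getElem?_append, List.length_take,
    List.getElem?_take, List.getElem?_drop]
  split_ifs with h1 h2 h3
  · rfl
  · omega
  · exact absurd h3 (by omega)
  · congr 2
    omega

theorem length_splice (xs : List Int) (j : Nat) (hj : j < xs.length) :
    (xs.take j ++ xs.drop (j + 1)).length = xs.length - 1 := by
  simp; omega

theorem goodIdx_splice (xs : List Int) (j m : Nat) (hj : j < xs.length) :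
    goodIdx (xs.take j ++ xs.drop (j + 1)) m
      = if m + 1 < j then goodIdx xs m
        else if m + 1 = j then goodB (xs.getD m 0) (xs.getD (m + 2) 0)
        else goodIdx xs (m + 1) := by
  simp only [goodIdx, getD_splice xs j m hj, getD_splice xs j (m + 1) hj]
  split_ifs with h1 h2 h3 h4 h5 <;> first
    | rfl
    | omega

theorem splice_nonempty (xs : List Int) (j : Nat) (hj : j < xs.length) (hn : 2 ≤ xs.length) :
    xs.take j ++ xs.drop (j + 1) ≠ [] := by
  intro hc
  have := length_splice xs j hj
  rw [hc] at this
  simp at this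
  omega

-- Bool equality from iff of coercions
theorem bool_eq_of_iff {a b : Bool} (h : a = true ↔ b = true) : a = b := by
  cases a <;> cases b <;> simp_all

-- the okB of the list with index k+1 removed equals B's t1 test, under firstness
theorem splice1_eq (xs : List Int) (k : Nat) (hk : k + 1 < xs.length)
    (hfirst : ∀ m, m < k → goodIdx xs m = true) :
    okA (xs.take (k + 1) ++ xs.drop (k + 2))
      = ((decide (k + 2 ≥ xs.length) || goodB (xs.getD k 0) (xs.getD (k + 2) 0)) && suffOk xs (k + 2)) := by
  have hn2 : 2 ≤ xs.length := by omega
  have hj : k + 1 < xs.length := hk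
  obtain ⟨a, t, he⟩ : ∃ a t, xs.take (k + 1) ++ xs.drop (k + 2) = a :: t := by
    cases h : xs.take (k + 1) ++ xs.drop (k + 2) with
    | nil => exact absurd h (splice_nonempty xs (k + 1) hj hn2)
    | cons a t => exact ⟨a, t, rfl⟩
  rw [he]
  show pairsOk a t = _
  apply bool_eq_of_iff
  rw [pairsOk_iff]
  have hlen : (a :: t).length = xs.length - 1 := by rw [← he]; exact length_splice xs (k + 1) hj
  have hgi : ∀ m, goodIdx (a :: t) m = goodIdx (xs.take (k + 1) ++ xs.drop (k + 2)) m := by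
    intro m; rw [he]
  simp only [hlen, hgi, goodIdx_splice xs (k + 1) _ hj]
  rw [Bool.and_eq_true, Bool.or_eq_true, suffOk_iff]
  constructor
  · intro h
    refine ⟨?_, ?_⟩
    · by_cases hge : k + 2 ≥ xs.length
      · left; simpa using hge
      · right
        have := h k (by omega)
        simpa [show ¬ k + 1 < k + 1 by omega] using this
    · intro m hm h2
      have := h (m - 1) (by omega)
      have e1 : ¬ (m - 1) + 1 < k + 1 := by omega
      have e2 : ¬ (m - 1) + 1 = k + 1 := by omega
      rw [if_neg e1, if_neg e2] at this
      have e3 : (m - 1) + 1 = m := by omega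
      rwa [e3] at this
  · rintro ⟨hst, hsuf⟩ m hm
    split_ifs with h1 h2
    · exact hfirst m (by omega)
    · have hm2 : m = k := by omega
      rcases hst with hge | hgood
      · simp at hge; omega
      · rwa [hm2]
    · exact hsuf (m + 1) (by omega) (by omega)

-- the okB of the list with index k removed equals B's t2 test, under firstness
theorem splice2_eq (xs : List Int) (k : Nat) (hk : k + 1 < xs.length)
    (hfirst : ∀ m, m < k → goodIdx xs m = true) :
    okA (xs.take k ++ xs.drop (k + 1))
      = ((k == 0 || goodB (xs.getD (k - 1) 0) (xs.getD (k + 1) 0)) && suffOk xs (k + 1)) := by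
  have hn2 : 2 ≤ xs.length := by omega
  have hj : k < xs.length := by omega
  obtain ⟨a, t, he⟩ : ∃ a t, xs.take k ++ xs.drop (k + 1) = a :: t := by
    cases h : xs.take k ++ xs.drop (k + 1) with
    | nil => exact absurd h (splice_nonempty xs k hj hn2)
    | cons a t => exact ⟨a, t, rfl⟩
  rw [he]
  show pairsOk a t = _
  apply bool_eq_of_iff
  rw [pairsOk_iff]
  have hlen : (a :: t).length = xs.length - 1 := by rw [← he]; exact length_splice xs k hj
  have hgi : ∀ m, goodIdx (a :: t) m = goodIdx (xs.take k ++ xs.drop (k + 1)) m := by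
    intro m; rw [he]
  simp only [hlen, hgi, goodIdx_splice xs k _ hj]
  rw [Bool.and_eq_true, Bool.or_eq_true, suffOk_iff]
  constructor
  · intro h
    refine ⟨?_, ?_⟩
    · by_cases hk0 : k = 0
      · left; simp [hk0]
      · right
        have := h (k - 1) (by omega)
        have e1 : ¬ (k - 1) + 1 < k := by omega
        have e2 : (k - 1) + 1 = k := by omega
        rw [if_neg e1, if_pos e2] at this
        have e3 : (k - 1) + 2 = k + 1 := by omega
        rwa [e3] at this
    · intro m hm h2
      have := h (m - 1) (by omega)
      have e1 : ¬ (m - 1) + 1 < k := by omega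
      have e2 : (m - 1) + 1 ≠ k := by omega
      rw [if_neg e1, if_neg e2] at this
      have e3 : (m - 1) + 1 = m := by omega
      rwa [e3] at this
  · rintro ⟨hst, hsuf⟩ m hm
    split_ifs with h1 h2
    · exact hfirst m (by omega)
    · rcases hst with hk0 | hgood
      · simp at hk0; omega
      · have e3 : m + 2 = (m + 1) + 1 := by omega
        have e4 : m = k - 1 := by omega
        rw [e4]
        have e5 : (k - 1) + 2 = k + 1 := by omega
        rwa [e5]
    · exact hsuf (m + 1) (by omega) (by omega)

-- A's loop characterised by the first bad pair at or after i-1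
theorem go_char (xs : List Int) :
    ∀ n i r (hi1 : 1 ≤ i), xs.length - i ≤ n →
      validlGo xs r i (xs.getD (i - 1) 0) hi1 =
        (match fbf xs (i - 1) with
         | none => (true, [])
         | some k =>
           if pyTruthy r then (false, [])
           else
             let res := (validl (xs.take (k + 1) ++ xs.drop (k + 2)) (some 1)).1
             let res2 := (validl (xs.take k ++ xs.drop (k + 1)) (some 1)).1
             let temp := (if res then [((k : Int) + 1)] else []) ++ (if res2 then [(k : Int)] else [])
             if temp.isEmpty then (false, []) else (true, temp)) := by
  intro n
  induction n with
  | zero =>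
    intro i r h1 h3
    have hni : ¬ i < xs.length := by omega
    rw [validlGo.eq_def, dif_neg hni, fbf_none xs (i - 1) (by omega)]
  | succ n ih =>
    intro i r h1 h3
    rw [validlGo.eq_def]
    by_cases hi : i < xs.length
    · rw [dif_pos hi]
      have hs : (i - 1) + 1 < xs.length := by omega
      rw [fbf_step xs (i - 1) hs]
      have e0 : (i - 1) + 1 = i := by omega
      have hviol : (xs.getD (i - 1) 0 == xs.getD i 0 || decide ((xs.getD (i - 1) 0 - xs.getD i 0).natAbs > 3))
          = !goodIdx xs (i - 1) := by
        simp only [goodIdx, e0, ← not_viol_eq_good, Bool.not_not]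
      simp only [hviol]
      by_cases hg : goodIdx xs (i - 1) = true
      · rw [if_pos hg, hg]
        simp only [Bool.not_true, Bool.false_eq_true, if_false]
        have hprev : xs.getD i 0 = xs.getD ((i + 1) - 1) 0 := by norm_num
        rw [hprev, ih (i + 1) r (by omega) (by omega)]
        rw [show i + 1 - 1 = (i - 1) + 1 by omega]
      · rw [if_neg hg]
        simp only [Bool.not_eq_true] at hg
        rw [hg]
        simp only [Bool.not_false, if_true]
        have ek : (i - 1) + 1 = i := e0
        have ek2 : (i - 1) + 2 = i + 1 := by omega
        have eki : ((i - 1 : Nat) : Int) + 1 = (i : Int) := by omega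
        have eki2 : ((i - 1 : Nat) : Int) = (i : Int) - 1 := by omega
        rw [ek, ek2, eki, eki2]
    · rw [dif_neg hi, fbf_none xs (i - 1) (by omega)]

-- ===== VERDICT (by name: the statement is the Claim_ definition above) =====
theorem validl_spec : Claim_equal_validl := by
  intro level r _ hpre
  unfold Spec_validl
  match level with
  | a :: t =>
    rw [validl, validl_alt, firstBad_eq_fbf]
    have hchar := go_char (a :: t) (a :: t).length 1 r (by omega) (by omega)
    have h0 : ((a :: t).getD (1 - 1) 0) = a := rfl
    rw [h0] at hchar
    rw [hchar]
    cases hf : fbf (a :: t) 0 with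
    | none => rfl
    | some k =>
      obtain ⟨-, hk1, -, hfirst⟩ := fbf_some (a :: t) 0 k hf
      simp only
      by_cases hr : pyTruthy r = true
      · rw [if_pos hr, if_pos hr]
      · rw [if_neg hr, if_neg hr]
        have hn2 : 2 ≤ (a :: t).length := by omega
        rw [validl_truthy _ (splice_nonempty (a :: t) (k + 1) hk1 hn2),
            validl_truthy _ (splice_nonempty (a :: t) k (by omega) hn2)]
        rw [splice1_eq (a :: t) k hk1 (fun m hm => hfirst m (by omega) hm),
            splice2_eq (a :: t) k hk1 (fun m hm => hfirst m (by omega) hm)]
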